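-- pv_equiv track=rewrite | github.com/marlonmei/WodGenerator | wodgen/scrape/scraper.py | insert_whitespace_alphabetical
-- ===== SOURCE A (Python) =====
-- from typing import List
--
-- def insert_whitespace_alphabetical(list_of_strings: List[str]) -> List[str]:
--     results = []
--     for input_string in list_of_strings:
--         output_string = ''
--         for i, char in enumerate(input_string):
--             if i < len(input_string) - 1 and char.islower() and input_string[i + 1].isupper():
--                 output_string += char + ' '
--             else:
--                 output_string += char
--         results.append(output_string)
--     return results
-- ===== SOURCE B (Python) =====
-- from typing import List
--
-- def insert_whitespace_alphabetical(list_of_strings: List[str]) -> List[str]: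
--     results = []
--     for s in list_of_strings:
--         cuts = [i for i in range(len(s) - 1) if s[i].islower() and s[i + 1].isupper()]
--         parts = []
--         start = 0
--         for cut in cuts:
--             parts.append(s[start:cut + 1])
--             start = cut + 1
--         parts.append(s[start:])
--         results.append(' '.join(parts))
--     return results
-- ===== Notes on version B (the rewrite author's own statement) =====
-- stated objective: alternative
-- what changed: Replaces A's single build-as-you-go pass (appending each char, with a space, via index lookahead) by two staged passes: first collect the list of cut indices where a lowercase char precedes an uppercase one, then rebuild the string by slicing the segments between successive cuts and joining them with ' '.
import Mathlib
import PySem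

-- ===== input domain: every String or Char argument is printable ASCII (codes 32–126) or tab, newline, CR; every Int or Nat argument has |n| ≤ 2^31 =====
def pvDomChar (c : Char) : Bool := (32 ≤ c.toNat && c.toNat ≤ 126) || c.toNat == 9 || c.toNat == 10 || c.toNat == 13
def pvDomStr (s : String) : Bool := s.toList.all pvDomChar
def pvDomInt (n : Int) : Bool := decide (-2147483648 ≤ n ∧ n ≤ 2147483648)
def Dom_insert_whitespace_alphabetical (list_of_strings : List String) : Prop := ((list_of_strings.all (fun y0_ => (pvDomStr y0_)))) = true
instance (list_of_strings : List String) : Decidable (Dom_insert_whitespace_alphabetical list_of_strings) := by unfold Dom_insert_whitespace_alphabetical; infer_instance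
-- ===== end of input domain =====

-- B replaces A's single build-as-you-go pass by two staged passes: collect cut indices, then slice segments and join with ' ' (alternative; same cost).


-- ===== PORT A =====
-- inner loop of A over one string: fold over enumerate, appending either [c, ' '] or [c];
-- s[i+1] is guarded by i < len-1, so pyGetD's default is never reached
def pvACore (cs : List Char) : List Char :=
  (PySem.List.enumerate cs 0).foldl
    (fun acc p =>
      acc ++ (if p.1 < (cs.length : Int) - 1 ∧ PySem.Chars.islower p.2 = true
                 ∧ PySem.Chars.isupper (PySem.List.pyGetD cs (p.1 + 1) ' ') = true
              then [p.2, ' '] else [p.2])) []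

def insert_whitespace_alphabetical (list_of_strings : List String) : List String :=
  list_of_strings.map (fun s => String.ofList (pvACore s.toList))

-- ===== PORT B =====
-- B's cut predicate: s[i].islower() and s[i+1].isupper() (indices produced by range(len(s)-1) are in range)
def pvCutP (cs : List Char) (i : Int) : Bool :=
  PySem.Chars.islower (PySem.List.pyGetD cs i ' ') && PySem.Chars.isupper (PySem.List.pyGetD cs (i + 1) ' ')

-- cuts = [i for i in range(len(s) - 1) if s[i].islower() and s[i+1].isupper()]
def pvCuts (cs : List Char) : List Int :=
  (PySem.List.pyRange 0 ((cs.length : Int) - 1) 1).filter (pvCutP cs)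

-- the loop over cuts carrying start: parts.append(s[start:cut+1]); start = cut+1; finally s[start:]
def pvSegs (cs : List Char) (cuts : List Int) (start : Int) : List (List Char) :=
  match cuts with
  | [] => [PySem.List.slice cs (some start) none]
  | k :: rest => PySem.List.slice cs (some start) (some (k + 1)) :: pvSegs cs rest (k + 1)

-- ' '.join(parts)
def pvBCore (cs : List Char) : List Char :=
  List.intercalate [' '] (pvSegs cs (pvCuts cs) 0)

def insert_whitespace_alphabetical_alt (list_of_strings : List String) : List String :=
  list_of_strings.map (fun s => String.ofList (pvBCore s.toList))

-- ===== PRECONDITION & SPEC =====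
def Spec_insert_whitespace_alphabetical (list_of_strings : List String) (out : List String) : Prop := out = insert_whitespace_alphabetical_alt list_of_strings
instance (list_of_strings : List String) (out : List String) : Decidable (Spec_insert_whitespace_alphabetical list_of_strings out) := by unfold Spec_insert_whitespace_alphabetical; infer_instance

-- ===== CLAIM (what is proved, stated in full; the proofs are below) =====
def Claim_equal_insert_whitespace_alphabetical : Prop := ∀ (list_of_strings : List String), Dom_insert_whitespace_alphabetical list_of_strings → Spec_insert_whitespace_alphabetical list_of_strings (insert_whitespace_alphabetical list_of_strings)

-- ===== LEMMAS AND PROOFS =====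

-- common reference recursion: space after c exactly when c is lower and its successor upper
def pvG : List Char → List Char
  | [] => []
  | [c] => [c]
  | c :: c' :: t =>
      (if PySem.Chars.islower c = true ∧ PySem.Chars.isupper c' = true
       then [c, ' '] else [c]) ++ pvG (c' :: t)

lemma pvG_short (l : List Char) (h : l.length ≤ 1) : pvG l = l := by
  match l, h with
  | [], _ => rfl
  | [c], _ => rfl

-- the per-element function of A's fold, as a flatMap body
def pvFA (full : List Char) (p : Int × Char) : List Char :=
  if p.1 < (full.length : Int) - 1 ∧ PySem.Chars.islower p.2 = true
     ∧ PySem.Chars.isupper (PySem.List.pyGetD full (p.1 + 1) ' ') = true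
  then [p.2, ' '] else [p.2]

lemma pvACore_flatMap (cs : List Char) :
    pvACore cs = (PySem.List.enumerate cs 0).flatMap (pvFA cs) := by
  unfold pvACore pvFA
  rw [PySem.List.foldl_append_eq_flatMap]
  rfl

lemma pvA_flatMap (full : List Char) (k : Nat) (c : Char) (t : List Char)
    (h : full.drop k = c :: t) :
    (PySem.List.enumerate (c :: t) (k : Int)).flatMap (pvFA full) = pvG (c :: t) := by
  induction t generalizing c k with
  | nil =>
      have hlen : full.length = k + 1 := by
        have := congrArg List.length h
        simp [List.length_drop] at this
        omega
      have hc : ¬ ((k : Int) < (full.length : Int) - 1) := by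
        rw [hlen]; push_cast; omega
      simp [PySem.List.enumerate_cons, PySem.List.enumerate_nil, pvFA, pvG, hc]
  | cons c' t' ih =>
      have hlen : full.length = k + t'.length + 2 := by
        have := congrArg List.length h
        simp [List.length_drop] at this
        omega
      have hdrop : full.drop (k + 1) = c' :: t' := by
        have h2 : full.drop (k + 1) = (full.drop k).drop 1 := by
          rw [List.drop_drop]
        rw [h2, h]; rfl
      have hget : full.getD (k + 1) ' ' = c' := by
        have h3 : full[k + 1]? = some c' := by
          have h0 : (full.drop (k + 1))[0]? = some c' := by rw [hdrop]; rfl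
          simpa [List.getElem?_drop] using h0
        simp [List.getD, h3]
      have hhead : pvFA full ((k : Int), c)
          = (if PySem.Chars.islower c = true ∧ PySem.Chars.isupper c' = true
             then [c, ' '] else [c]) := by
        have hk : ((k : Int) < (full.length : Int) - 1) := by
          rw [hlen]; push_cast; omega
        have hcast : ((k : Int) + 1) = ((k + 1 : Nat) : Int) := by omega
        rw [pvFA, hcast, PySem.List.pyGetD_natCast]
        simp only [hget]
        simp [hk]
      have hstart : ((k : Int) + 1) = ((k + 1 : Nat) : Int) := by omega
      rw [PySem.List.enumerate_cons, List.flatMap_cons, hhead, hstart,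
          ih (k + 1) c' hdrop]
      rfl

lemma pvACore_eq_pvG (cs : List Char) : pvACore cs = pvG cs := by
  cases cs with
  | nil => simp [pvACore_flatMap, PySem.List.enumerate_nil, pvG]
  | cons c t =>
      rw [pvACore_flatMap]
      have h := pvA_flatMap (c :: t) 0 c t rfl
      simpa using h

-- intercalate helpers
lemma pv_intercalate_singleton (l : List Char) : List.intercalate [' '] [l] = l := by
  simp [List.intercalate]

lemma pv_intercalate_cons₂ (a b : List Char) (l : List (List Char)) :
    List.intercalate [' '] (a :: b :: l) = a ++ [' '] ++ List.intercalate [' '] (b :: l) := by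
  simp [List.intercalate, List.intersperse]

lemma pvSegs_ne_nil (cs : List Char) (cuts : List Int) (start : Int) :
    pvSegs cs cuts start ≠ [] := by
  cases cuts <;> simp [pvSegs]

lemma pv_intercalate_segs_cons (cs : List Char) (cuts : List Int) (start : Int) (a : List Char) :
    List.intercalate [' '] (a :: pvSegs cs cuts start)
      = a ++ [' '] ++ List.intercalate [' '] (pvSegs cs cuts start) := by
  cases h : pvSegs cs cuts start with
  | nil => exact absurd h (pvSegs_ne_nil cs cuts start)
  | cons b l => rw [pv_intercalate_cons₂]

-- shifting the start across a non-cut position prepends that character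
lemma pvSegs_step (cs : List Char) (cuts : List Int) (st : Nat) (c : Char)
    (hdrop : cs.drop st = c :: cs.drop (st + 1))
    (hge : ∀ k ∈ cuts, (st : Int) + 1 ≤ k) :
    List.intercalate [' '] (pvSegs cs cuts (st : Int))
      = c :: List.intercalate [' '] (pvSegs cs cuts ((st : Int) + 1)) := by
  cases cuts with
  | nil =>
      have h1 : ((st : Int) + 1) = ((st + 1 : Nat) : Int) := by omega
      simp only [pvSegs, h1, PySem.List.slice_from_natCast, pv_intercalate_singleton, hdrop]
  | cons k rest =>
      have hk : (st : Int) + 1 ≤ k := hge k (by simp)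
      have hk0 : (0 : Int) ≤ k := by omega
      have h1 : ((st : Int) + 1) = ((st + 1 : Nat) : Int) := by omega
      have hkt : st + 1 ≤ (k + 1).toNat := by omega
      have e1 : PySem.List.slice cs (some (st : Int)) (some (k + 1))
          = (cs.drop st).take ((k + 1).toNat - st) := by
        rw [PySem.List.slice_toNat cs (by positivity) (by omega)]
        simp
      have e2 : PySem.List.slice cs (some ((st : Int) + 1)) (some (k + 1))
          = (cs.drop (st + 1)).take ((k + 1).toNat - (st + 1)) := by
        rw [h1, PySem.List.slice_toNat cs (by positivity) (by omega)]
        simp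
      have e3 : (cs.drop st).take ((k + 1).toNat - st)
          = c :: (cs.drop (st + 1)).take ((k + 1).toNat - (st + 1)) := by
        rw [hdrop]
        have : (k + 1).toNat - st = ((k + 1).toNat - (st + 1)) + 1 := by omega
        rw [this, List.take_succ_cons]
      simp only [pvSegs, e1, e2, e3]
      rw [pv_intercalate_segs_cons, pv_intercalate_segs_cons]
      simp

-- the main induction: from position st with m = len - st - 1 remaining boundaries to examine
lemma pvB_main (cs : List Char) (m : Nat) : ∀ st : Nat, st + 1 + m = cs.length →
    List.intercalate [' ']
        (pvSegs cs ((PySem.List.pyRange (st : Int) ((cs.length : Int) - 1) 1).filter (pvCutP cs)) (st : Int))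
      = pvG (cs.drop st) := by
  induction m with
  | zero =>
      intro st hst
      have hnil : PySem.List.pyRange (st : Int) ((cs.length : Int) - 1) 1 = [] := by
        apply PySem.List.pyRange_one_eq_nil; omega
      have hlen : (cs.drop st).length = 1 := by simp [List.length_drop]; omega
      rw [hnil]
      simp only [List.filter_nil, pvSegs, PySem.List.slice_from_natCast,
        pv_intercalate_singleton]
      rw [pvG_short _ (by omega)]
  | succ m ih =>
      intro st hst
      have hlt : (st : Int) < (cs.length : Int) - 1 := by omega
      have hcons := PySem.List.pyRange_one_cons hlt
      have hc : cs.drop st = cs[st] :: cs.drop (st + 1) := by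
        rw [List.drop_eq_getElem_cons (by omega)]
      have hc' : cs.drop (st + 1) = cs[st + 1] :: cs.drop (st + 2) := by
        rw [List.drop_eq_getElem_cons (by omega)]
      have hgd : cs.getD st ' ' = cs[st] := List.getD_eq_getElem cs ' ' (by omega)
      have hgd' : cs.getD (st + 1) ' ' = cs[st + 1] := List.getD_eq_getElem cs ' ' (by omega)
      have hP : pvCutP cs (st : Int)
          = (PySem.Chars.islower cs[st] && PySem.Chars.isupper cs[st + 1]) := by
        have h1 : ((st : Int) + 1) = ((st + 1 : Nat) : Int) := by omega
        rw [pvCutP, h1, PySem.List.pyGetD_natCast, PySem.List.pyGetD_natCast, hgd, hgd']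
      have hst1 : ((st : Int) + 1) = ((st + 1 : Nat) : Int) := by omega
      have hge : ∀ k ∈ (PySem.List.pyRange ((st : Int) + 1) ((cs.length : Int) - 1) 1).filter (pvCutP cs),
          (st : Int) + 1 ≤ k := by
        intro k hk
        have := (PySem.List.mem_pyRange_one).1 (List.mem_of_mem_filter hk)
        omega
      have hGcons : pvG (cs.drop st)
          = (if PySem.Chars.islower cs[st] = true ∧ PySem.Chars.isupper cs[st + 1] = true
             then [cs[st], ' '] else [cs[st]]) ++ pvG (cs.drop (st + 1)) := by
        rw [hc, hc']
        simp only [pvG]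
      rw [hcons, List.filter_cons]
      by_cases hp : pvCutP cs (st : Int) = true
      · have hpb : (PySem.Chars.islower cs[st] && PySem.Chars.isupper cs[st + 1]) = true := by
          rw [← hP]; exact hp
        have e1 : PySem.List.slice cs (some (st : Int)) (some ((st : Int) + 1))
            = [cs[st]] := by
          rw [PySem.List.slice_toNat cs (by positivity) (by positivity)]
          have h2 : ((st : Int) + 1).toNat - ((st : Int)).toNat = 1 := by omega
          have h3 : ((st : Int)).toNat = st := by omega
          rw [h2, h3, hc, List.take_succ_cons, List.take_zero]
        rw [if_pos hp]
        simp only [pvSegs, e1]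
        rw [pv_intercalate_segs_cons, hst1, ih (st + 1) (by omega), hGcons]
        simp only [Bool.and_eq_true] at hpb
        rw [if_pos ⟨hpb.1, hpb.2⟩]
        simp
      · rw [if_neg hp]
        rw [pvSegs_step cs _ st cs[st] hc (by rw [hst1] at hge ⊢; exact hge),
            hst1, ih (st + 1) (by omega), hGcons]
        have : ¬ (PySem.Chars.islower cs[st] = true ∧ PySem.Chars.isupper cs[st + 1] = true) := by
          intro hcontra
          apply hp
          rw [hP]
          simp [hcontra.1, hcontra.2]
        rw [if_neg this]
        simp

lemma pvBCore_eq_pvG (cs : List Char) : pvBCore cs = pvG cs := by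
  cases cs with
  | nil => rfl
  | cons c t =>
      have h := pvB_main (c :: t) t.length 0 (by simp; omega)
      simpa [pvBCore, pvCuts] using h

lemma pvCore_eq (cs : List Char) : pvACore cs = pvBCore cs := by
  rw [pvACore_eq_pvG, pvBCore_eq_pvG]

-- ===== VERDICT (by name: the statement is the Claim_ definition above) =====
theorem insert_whitespace_alphabetical_spec : Claim_equal_insert_whitespace_alphabetical := by
  intro L _
  unfold Spec_insert_whitespace_alphabetical insert_whitespace_alphabetical insert_whitespace_alphabetical_alt
  simp only [pvCore_eq]
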